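-- pv_equiv track=rewrite | github.com/jt291/algorithmique | tex/controles/corriges/ds/ds-algo-09-recherche.py | recherchekieme
-- ===== SOURCE A (Python) =====
-- def recherchekieme(t,x,k):
--     """
--     ok,i = recherchekieme(t,x,k)
--     recherche la kième occurence de x dans la liste t en commençant
--     par la fin de la liste.
--     ok == True si x a été trouvé à l'indice i, False sinon
--
--     >>> recherchekieme([1,2,1,3,4,1,5],1,2)
--     (True, 2)
--     >>> recherchekieme([1,2,1,3,4,1,5],1,4)
--     (False, -1)
--     """
--     assert type(t) is list
--     assert type(k) is int and k > 0
--
--     ok, i = False, len(t) - 1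
--     occur = 0
--     while i >= 0 and not ok:
--             if t[i] == x:
--                 occur = occur + 1
--                 if occur == k: ok = True
--                 else: i = i - 1
--             else: i = i - 1
--
--     return ok, i
-- ===== SOURCE B (Python) =====
-- def recherchekieme(t, x, k):
--     assert type(t) is list
--     assert type(k) is int and k > 0
--     pos = [i for i, v in enumerate(t) if v == x]
--     if len(pos) >= k:
--         return (True, pos[-k])
--     return (False, -1)
-- ===== Notes on version B (the rewrite author's own statement) =====
-- stated objective: alternative
-- what changed: Replaces the early-stopping backward scan with a running occurrence counter by one forward pass collecting all occurrence indices, then selecting the k-th from the end by negative indexing.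
import Mathlib
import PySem

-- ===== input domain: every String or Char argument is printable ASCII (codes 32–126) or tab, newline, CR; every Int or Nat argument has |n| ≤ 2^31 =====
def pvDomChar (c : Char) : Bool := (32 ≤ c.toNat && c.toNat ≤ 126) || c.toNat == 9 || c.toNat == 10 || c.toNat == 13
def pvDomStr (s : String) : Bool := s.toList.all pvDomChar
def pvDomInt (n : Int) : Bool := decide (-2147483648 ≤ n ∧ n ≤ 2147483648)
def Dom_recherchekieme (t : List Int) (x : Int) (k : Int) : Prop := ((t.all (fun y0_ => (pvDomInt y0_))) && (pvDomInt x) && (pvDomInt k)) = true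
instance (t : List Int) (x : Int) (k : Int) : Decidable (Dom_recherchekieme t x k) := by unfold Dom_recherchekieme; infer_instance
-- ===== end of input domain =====

-- B gathers all occurrence indices in one forward pass and picks the k-th from the end; same value as A's backward counting scan.
-- ===== PORT A =====
-- the while loop of A: scan from index i downwards, counting occurrences
def recherchekiemeLoop (t : List Int) (x : Int) (k : Int) (occur : Int) (i : Int) : Bool × Int :=
  if 0 ≤ i then
    if PySem.List.pyGetD t i 0 = x then
      if occur + 1 = k then (true, i)
      else recherchekiemeLoop t x k (occur + 1) (i - 1)
    else recherchekiemeLoop t x k occur (i - 1)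
  else (false, i)
termination_by (i + 1).toNat
decreasing_by all_goals omega

def recherchekieme (t : List Int) (x : Int) (k : Int) : Bool × Int :=
  recherchekiemeLoop t x k 0 ((t.length : Int) - 1)

-- ===== PORT B =====
def recherchekieme_alt (t : List Int) (x : Int) (k : Int) : Bool × Int :=
  let pos : List Int := ((PySem.List.enumerate t 0).filter (fun p => p.2 == x)).map (fun p => p.1)
  if k ≤ (pos.length : Int) then
    (true, (PySem.List.pyGet? pos (-k)).getD (-1))
  else (false, -1)

-- ===== PRECONDITION & SPEC =====
-- A asserts k > 0 (AssertionError otherwise); Pre_ excludes exactly those inputs.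
def Pre_recherchekieme (t : List Int) (x : Int) (k : Int) : Prop := 0 < k
instance (t : List Int) (x : Int) (k : Int) : Decidable (Pre_recherchekieme t x k) := by unfold Pre_recherchekieme; infer_instance
def pvWitness_recherchekieme : List Int × Int × Int := ([1, 2, 1, 3, 4, 1, 5], 1, 2)

def Spec_recherchekieme (t : List Int) (x : Int) (k : Int) (out : Bool × Int) : Prop := out = recherchekieme_alt t x k
instance (t : List Int) (x : Int) (k : Int) (out : Bool × Int) : Decidable (Spec_recherchekieme t x k out) := by unfold Spec_recherchekieme; infer_instance

-- ===== CLAIM (what is proved, stated in full; the proofs are below) =====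
def Claim_equal_recherchekieme : Prop := ∀ (t : List Int) (x : Int) (k : Int), Dom_recherchekieme t x k → Pre_recherchekieme t x k → Spec_recherchekieme t x k (recherchekieme t x k)

-- ===== LEMMAS AND PROOFS =====

-- indices j < n (as Ints, in increasing order) with t[j] = x
def occIdx (t : List Int) (x : Int) : Nat → List Int
  | 0 => []
  | n + 1 => occIdx t x n ++ (if t.getD n 0 = x then [(n : Int)] else [])

-- characterisation of A's backward loop in terms of the occurrence-index list
theorem loopA_eq (t : List Int) (x k : Int) :
    ∀ n, n ≤ t.length → ∀ occur : Int, occur < k →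
    recherchekiemeLoop t x k occur ((n : Int) - 1) =
      (if k - occur ≤ ((occIdx t x n).length : Int)
       then (true, (occIdx t x n).getD ((occIdx t x n).length - (k - occur).toNat) (-1))
       else (false, -1)) := by
  intro n
  induction n with
  | zero =>
    intro _ occur hocc
    rw [recherchekiemeLoop]
    simp [occIdx]
    omega
  | succ n ih =>
    intro hn occur hocc
    have hn' : n < t.length := by omega
    rw [recherchekiemeLoop]
    rw [if_pos (by push_cast; omega)]
    rw [show (((n + 1 : Nat) : Int) - 1) = (n : Int) by push_cast; ring]
    have hget : PySem.List.pyGetD t (n : Int) 0 = t.getD n 0 := PySem.List.pyGetD_natCast ..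
    by_cases hx : t.getD n 0 = x
    · rw [hget, if_pos (show t.getD n 0 = x from hx)]
      by_cases hk : occur + 1 = k
      · rw [if_pos hk]
        have hocc1 : occIdx t x (n + 1) = occIdx t x n ++ [(n : Int)] := by
          simp only [occIdx]; rw [if_pos hx]
        rw [hocc1]
        have hlen : ((occIdx t x n ++ [(n : Int)]).length : Int) = (occIdx t x n).length + 1 := by
          simp
        rw [if_pos (by rw [hlen]; omega)]
        have hkn : (k - occur).toNat = 1 := by omega
        rw [hkn]
        simp
      · rw [if_neg hk]
        have hocc1 : occur + 1 < k := by omega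
        rw [ih (by omega) (occur + 1) hocc1]
        have hocc2 : occIdx t x (n + 1) = occIdx t x n ++ [(n : Int)] := by
          simp only [occIdx]; rw [if_pos hx]
        rw [hocc2]
        have hL : ((occIdx t x n ++ [(n : Int)]).length : Int) = (occIdx t x n).length + 1 := by simp
        by_cases hc : k - (occur + 1) ≤ ((occIdx t x n).length : Int)
        · rw [if_pos hc, if_pos (by rw [hL]; omega)]
          have hidx : (occIdx t x n ++ [(n : Int)]).length - (k - occur).toNat
              = (occIdx t x n).length - (k - (occur + 1)).toNat := by
            simp only [List.length_append, List.length_singleton]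
            omega
          rw [hidx]
          have hlt : (occIdx t x n).length - (k - (occur + 1)).toNat < (occIdx t x n).length := by
            omega
          rw [List.getD_append _ _ _ _ hlt]
        · rw [if_neg hc, if_neg (by rw [hL]; omega)]
    · rw [hget, if_neg (show ¬ t.getD n 0 = x from hx)]
      rw [ih (by omega) occur hocc]
      have hocc2 : occIdx t x (n + 1) = occIdx t x n := by
        simp only [occIdx]; rw [if_neg hx]; simp
      rw [hocc2]

-- the comprehension over a range prefix collects exactly the occurrence indices
theorem posB_aux (t : List Int) (x : Int) :
    ∀ n : Nat, (((PySem.List.pyRange 0 (n : Int) 1).map (fun j => (j, PySem.List.pyGetD t j 0))).filter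
        (fun p => p.2 == x)).map (fun p => p.1) = occIdx t x n := by
  intro n
  induction n with
  | zero =>
    simp [occIdx, PySem.List.pyRange_one_eq_nil le_rfl]
  | succ n ih =>
    have hsplit : PySem.List.pyRange 0 ((n + 1 : Nat) : Int) 1
        = PySem.List.pyRange 0 (n : Int) 1 ++ [(n : Int)] := by
      push_cast
      exact PySem.List.pyRange_one_succ_right (by positivity)
    rw [hsplit, List.map_append, List.filter_append, List.map_append, ih]
    have hget : PySem.List.pyGetD t (n : Int) 0 = t.getD n 0 := PySem.List.pyGetD_natCast ..
    simp only [List.map_cons, List.map_nil, List.filter, hget]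
    by_cases hx : t.getD n 0 = x
    · rw [show (t.getD n 0 == x) = true by simpa using hx]
      simp only [occIdx]
      rw [if_pos hx]
      simp
    · rw [show (t.getD n 0 == x) = false by simpa using hx]
      simp only [occIdx]
      rw [if_neg hx]
      simp

-- B's forward comprehension builds exactly the occurrence-index list
theorem posB_eq (t : List Int) (x : Int) :
    ((PySem.List.enumerate t 0).filter (fun p => p.2 == x)).map (fun p => p.1)
      = occIdx t x t.length := by
  rw [PySem.List.enumerate_eq_map_pyRange (d := 0)]
  have hlen : PySem.List.len t = ((t.length : Nat) : Int) := by
    simp [PySem.List.len_eq]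
  rw [hlen]
  exact posB_aux t x t.length

-- ===== VERDICT (by name: the statement is the Claim_ definition above) =====
theorem recherchekieme_spec : Claim_equal_recherchekieme := by
  intro t x k _ hk
  unfold Spec_recherchekieme recherchekieme recherchekieme_alt
  rw [posB_eq]
  rw [show ((t.length : Int) - 1) = ((t.length : Nat) : Int) - 1 from rfl]
  rw [loopA_eq t x k t.length le_rfl 0 hk]
  set occ := occIdx t x t.length with hocc
  by_cases hc : k ≤ (occ.length : Int)
  · rw [if_pos (by omega), if_pos hc]
    have hkpos : 0 < k := hk
    have hget : PySem.List.pyGet? occ (-k) = occ[occ.length - k.toNat]? := by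
      rw [show (-k) = -((k.toNat : Int)) by omega]
      exact PySem.List.pyGet?_neg_natCast occ k.toNat (by omega) (by omega)
    rw [hget]
    have hlt : occ.length - k.toNat < occ.length := by omega
    simp [List.getD_eq_getElem?_getD, List.getElem?_eq_getElem hlt]
  · rw [if_neg (by omega), if_neg hc]
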